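-- pv_equiv track=rewrite | github.com/MiMoText/DescriptionDetector | main.py | count_vocab_words_in_text
-- ===== SOURCE A (Python) =====
-- def count_vocab_words_in_text(vocab, sentence):
--     count = 0
--     found_vocabs = []
--     for w_index in range(len(sentence)):
--         for vocab_sequence in vocab:
--             if w_index + len(vocab_sequence) < len(sentence):
--                 index = w_index
--                 match = True
--                 for vocab_word in vocab_sequence:
--                     if vocab_word != sentence[index]:
--                         match = False
--                         break
--                     index += 1
--                 if match:
--                     found_vocabs.append(vocab_sequence)
--                     count += 1
--     return count, found_vocabs
-- ===== SOURCE B (Python) =====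
-- def count_vocab_words_in_text(vocab, sentence):
--     # Index phrases by their first word so each position only checks phrases
--     # that can possibly start there (raises IndexError on an empty phrase).
--     buckets = {}
--     for phrase in vocab:
--         buckets.setdefault(phrase[0], []).append(phrase)
--     n = len(sentence)
--     count = 0
--     found_vocabs = []
--     for i in range(n):
--         for phrase in buckets.get(sentence[i], ()):
--             L = len(phrase)
--             if i + L < n and sentence[i + 1:i + L] == phrase[1:]:
--                 found_vocabs.append(phrase)
--                 count += 1
--     return count, found_vocabs
-- ===== Notes on version B (the rewrite author's own statement) =====
-- stated objective: alternative
-- what changed: B builds a dict bucketing vocab phrases by first word once, so each sentence position only checks phrases that can start there (the per-position scan over the whole vocab disappears) and compares the rest of a phrase by slicing instead of A's word-by-word flag loop.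
-- outside the precondition, e.g. on count_vocab_words_in_text([[]], ['a', 'b']): A returns (2, [[], []]), B raises IndexError
import Mathlib
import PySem

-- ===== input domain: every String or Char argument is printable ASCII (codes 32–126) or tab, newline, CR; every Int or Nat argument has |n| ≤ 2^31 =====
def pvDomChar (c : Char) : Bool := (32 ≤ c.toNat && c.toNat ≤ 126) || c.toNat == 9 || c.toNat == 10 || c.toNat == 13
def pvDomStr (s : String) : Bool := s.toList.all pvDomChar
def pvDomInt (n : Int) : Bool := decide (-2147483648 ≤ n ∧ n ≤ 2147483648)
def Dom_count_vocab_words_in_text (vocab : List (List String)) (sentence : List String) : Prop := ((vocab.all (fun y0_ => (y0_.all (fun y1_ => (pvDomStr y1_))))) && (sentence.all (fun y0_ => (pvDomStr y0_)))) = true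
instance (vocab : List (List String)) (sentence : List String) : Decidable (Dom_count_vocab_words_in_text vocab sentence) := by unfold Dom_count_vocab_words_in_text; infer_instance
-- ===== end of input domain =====

-- B buckets the vocab phrases by first word in a dict built once, so each sentence
-- position only examines phrases that can start there; return values proved equal on
-- vocabularies without empty phrases (on which B's phrase[0] raises).

-- ===== PORT A =====
-- sentence[index] inside the word loop: pyGet? is exact (the bound guard keeps index in range,
-- so the `none` branch is never the result of an in-Python IndexError here);
-- the `break` is modelled by the flag short-circuit: once match = false the state is frozen.
def count_vocab_words_in_text (vocab : List (List String)) (sentence : List String) : Int × List (List String) :=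
  (PySem.List.pyRange 0 (sentence.length : Int) 1).foldl (fun acc w_index =>
    vocab.foldl (fun acc vocab_sequence =>
      if w_index + (vocab_sequence.length : Int) < (sentence.length : Int) then
        let r := vocab_sequence.foldl (fun (st : Int × Bool) vocab_word =>
          if st.2 = false then st
          else if ¬ (PySem.List.pyGet? sentence st.1 = some vocab_word) then (st.1, false)
          else (st.1 + 1, true)) (w_index, true)
        if r.2 = true then (acc.1 + 1, acc.2 ++ [vocab_sequence]) else acc
      else acc) acc) ((0 : Int), ([] : List (List String)))

-- ===== PORT B =====
-- buckets.setdefault(phrase[0], []).append(phrase) is Dict.modify … [] (· ++ [phrase]);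
-- phrase[0] raises IndexError on an empty phrase (excluded by Pre_): the [] branch mirrors that gap.
def count_vocab_words_in_text_alt (vocab : List (List String)) (sentence : List String) : Int × List (List String) :=
  let buckets : PySem.Dict String (List (List String)) :=
    vocab.foldl (fun d phrase =>
      match phrase with
      | [] => d
      | w :: _ => PySem.Dict.modify d w [] (fun l => l ++ [phrase])) PySem.Dict.empty
  let n : Int := (sentence.length : Int)
  (PySem.List.pyRange 0 n 1).foldl (fun acc i =>
    (PySem.Dict.getD buckets (PySem.List.pyGetD sentence i "") []).foldl (fun acc phrase =>
      if i + (phrase.length : Int) < n ∧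
         PySem.List.slice sentence (some (i + 1)) (some (i + (phrase.length : Int)))
           = PySem.List.slice phrase (some 1) none
      then (acc.1 + 1, acc.2 ++ [phrase]) else acc) acc) ((0 : Int), ([] : List (List String)))

-- ===== PRECONDITION & SPEC =====
-- Pre_ excludes vocabularies containing an empty phrase: A counts an empty phrase once per
-- position (a vacuous-match artefact), while B's phrase[0] raises IndexError there.
def Pre_count_vocab_words_in_text (vocab : List (List String)) (sentence : List String) : Prop :=
  [] ∉ vocab
instance (vocab : List (List String)) (sentence : List String) : Decidable (Pre_count_vocab_words_in_text vocab sentence) := by unfold Pre_count_vocab_words_in_text; infer_instance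
def pvWitness_count_vocab_words_in_text : List (List String) × List String :=
  ([["a"], ["a", "b"]], ["a", "b", "c"])
def Spec_count_vocab_words_in_text (vocab : List (List String)) (sentence : List String) (out : Int × List (List String)) : Prop := out = count_vocab_words_in_text_alt vocab sentence
instance (vocab : List (List String)) (sentence : List String) (out : Int × List (List String)) : Decidable (Spec_count_vocab_words_in_text vocab sentence out) := by unfold Spec_count_vocab_words_in_text; infer_instance

-- ===== CLAIM (what is proved, stated in full; the proofs are below) =====
def Claim_equal_count_vocab_words_in_text : Prop := ∀ (vocab : List (List String)) (sentence : List String), Dom_count_vocab_words_in_text vocab sentence → Pre_count_vocab_words_in_text vocab sentence → Spec_count_vocab_words_in_text vocab sentence (count_vocab_words_in_text vocab sentence)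

-- ===== LEMMAS AND PROOFS =====

def pvMatchA (sentence : List String) (seq : List String) (st : Int × Bool) : Int × Bool :=
  seq.foldl (fun (st : Int × Bool) vocab_word =>
    if st.2 = false then st
    else if ¬ (PySem.List.pyGet? sentence st.1 = some vocab_word) then (st.1, false)
    else (st.1 + 1, true)) st

lemma pvMatchA_false (sentence seq : List String) (i : Int) :
    pvMatchA sentence seq (i, false) = (i, false) := by
  induction seq with
  | nil => rfl
  | cons w rest ih => simpa [pvMatchA, List.foldl] using ih

lemma pvMatchA_snd (sentence seq : List String) (k : ℕ) :
    (pvMatchA sentence seq ((k : Int), true)).2 = seq.isPrefixOf (sentence.drop k) := by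
  induction seq generalizing k with
  | nil => simp [pvMatchA, List.isPrefixOf]
  | cons w rest ih =>
    have hstep : pvMatchA sentence (w :: rest) ((k : Int), true)
        = if sentence[k]? = some w
          then pvMatchA sentence rest (((k + 1 : ℕ) : Int), true)
          else pvMatchA sentence rest ((k : Int), false) := by
      simp only [pvMatchA, List.foldl_cons]
      by_cases h : sentence[k]? = some w
      · simp [h]
      · simp [h]
    rw [hstep]
    by_cases hk : k < sentence.length
    · have hdrop : sentence.drop k = sentence[k] :: sentence.drop (k + 1) :=
        (List.getElem_cons_drop hk).symm
      by_cases hw : sentence[k] = w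
      · have hcast := ih (k + 1)
        push_cast at hcast
        simp [hw, List.getElem?_eq_getElem hk, hdrop, hcast]
      · have : ¬ sentence[k]? = some w := by
          simp [List.getElem?_eq_getElem hk, hw]
        rw [if_neg this, pvMatchA_false, hdrop]
        simp [List.isPrefixOf]
        exact fun h => absurd h.symm hw
    · have hge : sentence.length ≤ k := Nat.le_of_not_lt hk
      have hnone : sentence[k]? = none := List.getElem?_eq_none_iff.2 hge
      simp [hnone, pvMatchA_false, List.drop_eq_nil_of_le hge]

def pvCondA (sentence : List String) (i : Int) (p : List String) : Bool :=
  decide (i + (p.length : Int) < (sentence.length : Int)) && (pvMatchA sentence p (i, true)).2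

def pvCondB (sentence : List String) (i : Int) (p : List String) : Bool :=
  decide (i + (p.length : Int) < (sentence.length : Int) ∧
    PySem.List.slice sentence (some (i + 1)) (some (i + (p.length : Int)))
      = PySem.List.slice p (some 1) none)

def pvStep (cond : List String → Bool) (acc : Int × List (List String)) (p : List String) : Int × List (List String) :=
  if cond p then (acc.1 + 1, acc.2 ++ [p]) else acc

lemma pvFold_step (cond : List String → Bool) (xs : List (List String)) (c : Int) (l : List (List String)) :
    xs.foldl (pvStep cond) (c, l) = (c + ((xs.filter cond).length : Int), l ++ xs.filter cond) := by
  induction xs generalizing c l with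
  | nil => simp
  | cons x rest ih =>
    by_cases hx : cond x
    · rw [List.foldl_cons, show pvStep cond (c, l) x = (c + 1, l ++ [x]) from by simp [pvStep, hx], ih]
      simp [hx]
      omega
    · rw [List.foldl_cons, show pvStep cond (c, l) x = (c, l) from by simp [pvStep, hx], ih]
      simp [hx]

lemma pvBuild_getD (vocab : List (List String)) (d : PySem.Dict String (List (List String))) (w : String) :
    PySem.Dict.getD (vocab.foldl (fun d phrase =>
      match phrase with
      | [] => d
      | x :: _ => PySem.Dict.modify d x [] (fun l => l ++ [phrase])) d) w []
    = PySem.Dict.getD d w [] ++ vocab.filter (fun p => p.head? == some w) := by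
  induction vocab generalizing d with
  | nil => simp
  | cons p rest ih =>
    cases p with
    | nil => simp [List.foldl_cons, ih]
    | cons x tl =>
      rw [List.foldl_cons, ih]
      by_cases hw : w = x
      · subst hw
        simp
      · simp [PySem.Dict.getD_modify, hw, Ne.symm hw]

lemma pvPrefix_decide (l s : List String) : l.isPrefixOf s = decide (s.take l.length = l) := by
  rw [Bool.eq_iff_iff]
  simp only [List.isPrefixOf_iff_prefix, decide_eq_true_eq, List.prefix_iff_eq_take]
  exact eq_comm

lemma pvCond_eq (sentence : List String) (p : List String) (hp : p ≠ []) (k : ℕ) (hk : k < sentence.length) :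
    pvCondA sentence (k : Int) p = ((p.head? == some sentence[k]) && pvCondB sentence (k : Int) p) := by
  cases p with
  | nil => exact absurd rfl hp
  | cons w rest =>
    by_cases hb : (k : Int) + ((w :: rest).length : Int) < (sentence.length : Int)
    · have hdrop : sentence.drop k = sentence[k] :: sentence.drop (k + 1) :=
        (List.getElem_cons_drop hk).symm
      have h1 : (k : Int) + 1 = ((k + 1 : ℕ) : Int) := by push_cast; ring
      have h2 : (k : Int) + ((w :: rest).length : Int) = ((k + 1 + rest.length : ℕ) : Int) := by
        simp [List.length_cons]; ring
      have hslice : PySem.List.slice sentence (some ((k : Int) + 1))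
            (some ((k : Int) + ((w :: rest).length : Int)))
          = (sentence.drop (k + 1)).take rest.length := by
        rw [h1, h2, PySem.List.slice_natCast]
        congr 1
        omega
      have hrest : PySem.List.slice (w :: rest) (some (1 : Int)) none = rest := by
        rw [show (1 : Int) = ((1 : ℕ) : Int) from rfl, PySem.List.slice_from_natCast]
        simp
      unfold pvCondA pvCondB
      rw [pvMatchA_snd, hdrop, hslice, hrest]
      rw [show ((w :: rest).isPrefixOf (sentence[k] :: sentence.drop (k + 1)))
            = ((w == sentence[k]) && rest.isPrefixOf (sentence.drop (k + 1))) from by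
          simp [List.isPrefixOf]]
      rw [pvPrefix_decide]
      cases hwb : (w == sentence[k]) <;> simp [hwb]
    · have hb' : ¬ ((k : Int) + ((rest.length : Int) + 1) < (sentence.length : Int)) := by
        simp only [List.length_cons] at hb
        push_cast at hb
        omega
      unfold pvCondA pvCondB
      simp [hb']

-- ===== VERDICT (by name: the statement is the Claim_ definition above) =====
theorem count_vocab_words_in_text_spec : Claim_equal_count_vocab_words_in_text := by
  intro vocab sentence _hdom hpre
  unfold Spec_count_vocab_words_in_text
  unfold count_vocab_words_in_text count_vocab_words_in_text_alt
  apply PySem.List.foldl_congr_mem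
  intro acc i hi
  have hi' := (PySem.List.mem_pyRange_one.1 hi)
  obtain ⟨h0, hiN⟩ := hi'
  -- write i as a natural number k
  obtain ⟨k, rfl⟩ : ∃ k : ℕ, i = (k : Int) := ⟨i.toNat, (Int.toNat_of_nonneg h0).symm⟩
  have hk : k < sentence.length := by exact_mod_cast hiN
  -- rewrite both inner folds into the canonical pvStep shape
  have hA : vocab.foldl (fun acc vocab_sequence =>
      if (k : Int) + (vocab_sequence.length : Int) < (sentence.length : Int) then
        let r := vocab_sequence.foldl (fun (st : Int × Bool) vocab_word =>
          if st.2 = false then st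
          else if ¬ (PySem.List.pyGet? sentence st.1 = some vocab_word) then (st.1, false)
          else (st.1 + 1, true)) ((k : Int), true)
        if r.2 = true then (acc.1 + 1, acc.2 ++ [vocab_sequence]) else acc
      else acc) acc = vocab.foldl (pvStep (pvCondA sentence (k : Int))) acc := by
    apply PySem.List.foldl_congr_mem
    intro acc p _
    simp only [pvStep, pvCondA, pvMatchA, Bool.and_eq_true, decide_eq_true_eq]
    by_cases hb : (k : Int) + (p.length : Int) < (sentence.length : Int) <;>
      by_cases hm : (p.foldl (fun (st : Int × Bool) vocab_word =>
          if st.2 = false then st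
          else if ¬ (PySem.List.pyGet? sentence st.1 = some vocab_word) then (st.1, false)
          else (st.1 + 1, true)) ((k : Int), true)).2 = true <;>
      simp [hb]
  rw [hA]
  have hword : PySem.List.pyGetD sentence ((k : Int)) "" = sentence[k] := by
    rw [PySem.List.pyGetD_natCast]
    simp [List.getD_eq_getElem?_getD, List.getElem?_eq_getElem hk]
  have hbucket : PySem.Dict.getD (vocab.foldl (fun d phrase =>
      match phrase with
      | [] => d
      | w :: _ => PySem.Dict.modify d w [] (fun l => l ++ [phrase])) PySem.Dict.empty)
      (PySem.List.pyGetD sentence ((k : Int)) "") []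
      = vocab.filter (fun p => p.head? == some sentence[k]) := by
    rw [hword, pvBuild_getD]
    simp
  have hB : (PySem.Dict.getD (vocab.foldl (fun d phrase =>
      match phrase with
      | [] => d
      | w :: _ => PySem.Dict.modify d w [] (fun l => l ++ [phrase])) PySem.Dict.empty)
      (PySem.List.pyGetD sentence ((k : Int)) "") []).foldl (fun acc phrase =>
      if (k : Int) + (phrase.length : Int) < (sentence.length : Int) ∧
         PySem.List.slice sentence (some ((k : Int) + 1)) (some ((k : Int) + (phrase.length : Int)))
           = PySem.List.slice phrase (some 1) none
      then (acc.1 + 1, acc.2 ++ [phrase]) else acc) acc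
      = (vocab.filter (fun p => p.head? == some sentence[k])).foldl
          (pvStep (pvCondB sentence (k : Int))) acc := by
    rw [hbucket]
    apply PySem.List.foldl_congr_mem
    intro acc p _
    simp only [pvStep, pvCondB]
    split_ifs with h1 h2 h2 <;> first | rfl | (exfalso; first | exact h2 (by exact_mod_cast of_decide_eq_true (by exact h1)) | simp_all)
  rw [hB]
  -- both sides are now canonical folds; compare the filtered lists
  rw [pvFold_step, pvFold_step, List.filter_filter]
  have hfilt : vocab.filter (pvCondA sentence (k : Int))
      = vocab.filter (fun p => pvCondB sentence (k : Int) p && (p.head? == some sentence[k])) := by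
    apply List.filter_congr
    intro p hp
    exact (pvCond_eq sentence p (fun h => hpre (h ▸ hp)) k hk).trans (Bool.and_comm ..)
  rw [hfilt]
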